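-- pv_equiv track=rewrite | github.com/svend4/meta | projects/hexglyph/solan_semantic.py | nearest_in_lex
-- ===== SOURCE A (Python) =====
-- def hamming_dist(a: list[int], b: list[int]) -> int:
--     """Cell-level Q6 Hamming distance."""
--     return sum(1 for x, y in zip(a, b) if x != y)
--
-- def nearest_in_lex(
--     state:    list[int],
--     lex_ics:  dict[str, list[int]],
--     top_n:    int = 3,
-- ) -> list[tuple[str, int]]:
--     """Top-N nearest lexicon words to an orbit state (sorted by Hamming dist)."""
--     dists = [(w, hamming_dist(state, ic)) for w, ic in lex_ics.items()]
--     dists.sort(key=lambda x: (x[1], x[0]))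
--     return dists[:top_n]
-- ===== SOURCE B (Python) =====
-- def hamming_dist(a: list[int], b: list[int]) -> int:
--     """Cell-level Q6 Hamming distance."""
--     return sum(1 for x, y in zip(a, b) if x != y)
--
-- def nearest_in_lex(
--     state:    list[int],
--     lex_ics:  dict[str, list[int]],
--     top_n:    int = 3,
-- ) -> list[tuple[str, int]]:
--     """Top-N nearest lexicon words, by counting-sort-style distance buckets
--     instead of sorting the whole (word, dist) list."""
--     buckets: dict[int, list[str]] = {}
--     for w, ic in lex_ics.items():
--         buckets.setdefault(hamming_dist(state, ic), []).append(w)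
--     out: list[tuple[str, int]] = []
--     for d in sorted(buckets):
--         for w in sorted(buckets[d]):
--             out.append((w, d))
--     return out[:top_n]
-- ===== Notes on version B (the rewrite author's own statement) =====
-- stated objective: alternative
-- what changed: Replaces the global sort of the (word, dist) list with a bucketing pass: a dict mapping each Hamming distance to its words, emitted in ascending distance order with each bucket sorted alphabetically, then sliced.
import Mathlib
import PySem

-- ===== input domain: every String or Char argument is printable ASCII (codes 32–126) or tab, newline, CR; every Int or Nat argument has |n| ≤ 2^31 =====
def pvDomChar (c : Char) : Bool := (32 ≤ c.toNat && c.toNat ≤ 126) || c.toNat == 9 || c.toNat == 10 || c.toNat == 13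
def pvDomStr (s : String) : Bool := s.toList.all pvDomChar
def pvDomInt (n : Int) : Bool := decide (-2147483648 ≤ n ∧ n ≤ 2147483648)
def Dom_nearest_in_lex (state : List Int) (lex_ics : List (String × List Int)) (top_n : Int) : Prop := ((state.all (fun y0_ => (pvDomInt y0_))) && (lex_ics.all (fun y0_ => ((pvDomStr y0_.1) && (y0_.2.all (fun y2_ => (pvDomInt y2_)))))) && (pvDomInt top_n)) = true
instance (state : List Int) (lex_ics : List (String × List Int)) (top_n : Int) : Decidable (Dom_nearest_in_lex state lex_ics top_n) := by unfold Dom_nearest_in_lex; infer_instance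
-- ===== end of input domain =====

-- B replaces A's global sort of the (word, dist) list by distance buckets (dict dist -> words)
-- emitted in ascending distance order, each bucket sorted alphabetically; same result, similar cost.

-- ===== PORT A =====
-- sum(1 for x, y in zip(a, b) if x != y)
def hamming_dist (a : List Int) (b : List Int) : Int :=
  (((a.zip b).filter (fun p => p.1 != p.2)).map (fun _ => (1 : Int))).sum

def nearest_in_lex (state : List Int) (lex_ics : List (String × List Int)) (top_n : Int) : List (String × Int) :=
  let dists := lex_ics.map (fun p => (p.1, hamming_dist state p.2))
  let dists := PySem.List.sorted2 dists (fun x => x.2) (fun x => x.1)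
  PySem.List.slice dists none (some top_n)

-- ===== PORT B =====
-- buckets.setdefault(hamming_dist(state, ic), []).append(w)  ==  Dict.modify with default [] appending w
def nearest_in_lex_alt (state : List Int) (lex_ics : List (String × List Int)) (top_n : Int) : List (String × Int) :=
  let buckets : PySem.Dict Int (List String) :=
    lex_ics.foldl (fun d p => d.modify (hamming_dist state p.2) [] (fun ws => ws ++ [p.1])) PySem.Dict.empty
  let out : List (String × Int) :=
    (PySem.List.sorted buckets.keys (fun d => d)).foldl
      (fun acc d =>
        (PySem.List.sorted (buckets.getD d []) (fun w => w)).foldl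
          (fun acc2 w => acc2 ++ [(w, d)]) acc) []
  PySem.List.slice out none (some top_n)

-- ===== PRECONDITION & SPEC =====
def Spec_nearest_in_lex (state : List Int) (lex_ics : List (String × List Int)) (top_n : Int) (out : List (String × Int)) : Prop := out = nearest_in_lex_alt state lex_ics top_n
instance (state : List Int) (lex_ics : List (String × List Int)) (top_n : Int) (out : List (String × Int)) : Decidable (Spec_nearest_in_lex state lex_ics top_n out) := by unfold Spec_nearest_in_lex; infer_instance

-- ===== CLAIM (what is proved, stated in full; the proofs are below) =====
def Claim_equal_nearest_in_lex : Prop := ∀ (state : List Int) (lex_ics : List (String × List Int)) (top_n : Int), Dom_nearest_in_lex state lex_ics top_n → Spec_nearest_in_lex state lex_ics top_n (nearest_in_lex state lex_ics top_n)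

-- ===== LEMMAS AND PROOFS =====

-- A's lexicographic sort key (dist, word), as a single linearly ordered key
def pvKey (x : String × Int) : Int ×ₗ String := toLex (x.2, x.1)

theorem pvKey_injective : Function.Injective pvKey := by
  intro a b h
  have h' : (a.2, a.1) = (b.2, b.1) := toLex_inj.mp h
  exact Prod.ext (congrArg Prod.snd h') (congrArg Prod.fst h')

-- A's tuple-key comparison IS the strict order of pvKey
theorem pv_before_eq :
    (fun (a b : String × Int) => decide (a.2 < b.2) || (!decide (b.2 < a.2) && decide (a.1 < b.1)))
      = (fun a b => decide (pvKey a < pvKey b)) := by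
  funext a b
  have hiff : (pvKey a < pvKey b) ↔ (a.2 < b.2 ∨ (¬ b.2 < a.2 ∧ a.1 < b.1)) := by
    simp only [pvKey, Prod.Lex.toLex_lt_toLex]
    constructor
    · rintro (h | ⟨h, h'⟩)
      · exact Or.inl h
      · exact Or.inr ⟨by simp [h], h'⟩
    · rintro (h | ⟨h, h'⟩)
      · exact Or.inl h
      · rcases lt_or_eq_of_le (not_lt.mp h) with h2 | h2
        · exact Or.inl h2
        · exact Or.inr ⟨h2, h'⟩
  have hd : decide (pvKey a < pvKey b) = decide (a.2 < b.2 ∨ (¬ b.2 < a.2 ∧ a.1 < b.1)) :=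
    decide_eq_decide.mpr hiff
  rw [hd]
  by_cases h1 : a.2 < b.2 <;> by_cases h2 : b.2 < a.2 <;> by_cases h3 : a.1 < b.1 <;>
    simp [h1, h2, h3]

theorem pv_sorted2_eq_sorted (xs : List (String × Int)) :
    PySem.List.sorted2 xs (fun x => x.2) (fun x => x.1) = PySem.List.sorted xs pvKey := by
  rw [PySem.List.sorted_eq_foldl_insertBy]
  show List.foldl (fun acc x => PySem.List.insertBy
      (fun a b => decide (a.2 < b.2) || (!decide (b.2 < a.2) && decide (a.1 < b.1))) x acc) [] xs = _
  rw [pv_before_eq]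

-- the (dist, word) pair list the bucket fold really consumes
def pvPairs (state : List Int) (lex_ics : List (String × List Int)) : List (Int × String) :=
  lex_ics.map (fun p => (hamming_dist state p.2, p.1))

def pvBuckets (state : List Int) (lex_ics : List (String × List Int)) : PySem.Dict Int (List String) :=
  lex_ics.foldl (fun d p => d.modify (hamming_dist state p.2) [] (fun ws => ws ++ [p.1])) PySem.Dict.empty

theorem pvBuckets_eq_foldl_pairs (state : List Int) (lex_ics : List (String × List Int)) :
    pvBuckets state lex_ics =
      (pvPairs state lex_ics).foldl (fun d p => d.modify p.1 [] (fun ws => ws ++ [p.2])) PySem.Dict.empty := by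
  unfold pvBuckets pvPairs
  rw [List.foldl_map]

theorem pvBuckets_getD (state : List Int) (lex_ics : List (String × List Int)) (c : Int) :
    (pvBuckets state lex_ics).getD c [] =
      ((pvPairs state lex_ics).filter (fun q => q.1 == c)).map (fun q => q.2) := by
  rw [pvBuckets_eq_foldl_pairs, PySem.Dict.getD_foldl_modify_append]
  simp [PySem.Dict.getD_empty]

theorem pvBuckets_keys_nodup (state : List Int) (lex_ics : List (String × List Int)) :
    (pvBuckets state lex_ics).keys.Nodup := by
  rw [pvBuckets_eq_foldl_pairs]
  exact PySem.Dict.nodup_keys_foldl_modify_key (pvPairs state lex_ics) (fun p => p.1) []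
    (fun _ p ws => ws ++ [p.2]) PySem.Dict.empty PySem.Dict.nodup_keys_empty

theorem pvBuckets_mem_keys (state : List Int) (lex_ics : List (String × List Int)) (c : Int) :
    c ∈ (pvBuckets state lex_ics).keys ↔ c ∈ (pvPairs state lex_ics).map (fun q => q.1) := by
  rw [pvBuckets_eq_foldl_pairs, PySem.Dict.keys_foldl_modify_key]
  simp [PySem.Set.mem_update, PySem.Dict.keys_empty]

-- partitioning a pair list by a nodup cover of its keys is a permutation
theorem pv_flat_partition (ks : List Int) (pl : List (Int × String))
    (hnd : ks.Nodup) (hmem : ∀ c, c ∈ ks ↔ c ∈ pl.map (fun q => q.1)) :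
    (ks.flatMap (fun c => ((pl.filter (fun q => q.1 == c)).map (fun q => (q.2, q.1))))).Perm
      (pl.map (fun q => (q.2, q.1))) := by
  induction ks generalizing pl with
  | nil =>
    cases pl with
    | nil => simp
    | cons q t => exact absurd ((hmem q.1).mpr (by simp)) (by simp)
  | cons c ks ih =>
    have hc : c ∉ ks := (List.nodup_cons.mp hnd).1
    have hnd' : ks.Nodup := (List.nodup_cons.mp hnd).2
    have hagree : ∀ c' ∈ ks,
        (pl.filter (fun q => !(q.1 == c))).filter (fun q => q.1 == c')
          = pl.filter (fun q => q.1 == c') := by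
      intro c' hc'
      rw [List.filter_filter]
      apply List.filter_congr
      intro q _
      by_cases h : q.1 = c'
      · have hcc : ¬ c' = c := by
          rintro rfl
          exact hc hc'
        simp [h, hcc]
      · simp [h]
    have hmem' : ∀ c', c' ∈ ks ↔ c' ∈ (pl.filter (fun q => !(q.1 == c))).map (fun q => q.1) := by
      intro c'
      constructor
      · intro h
        have hcc : ¬ c' = c := by
          rintro rfl
          exact hc h
        obtain ⟨q, hq, hq1⟩ := List.mem_map.mp ((hmem c').mp (List.mem_cons_of_mem _ h))
        exact List.mem_map.mpr ⟨q, List.mem_filter.mpr ⟨hq, by simp [hq1, hcc]⟩, hq1⟩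
      · intro h
        obtain ⟨q, hq, hq1⟩ := List.mem_map.mp h
        have hq' := List.mem_filter.mp hq
        have hcc : ¬ c' = c := by
          rintro rfl
          simp [hq1] at hq'
        rcases List.mem_cons.mp ((hmem c').mpr (List.mem_map.mpr ⟨q, hq'.1, hq1⟩)) with h' | h'
        · exact absurd h' hcc
        · exact h'
    have hrec := ih (pl.filter (fun q => !(q.1 == c))) hnd' hmem'
    rw [List.flatMap_cons]
    have hflat : ks.flatMap (fun c' => ((pl.filter (fun q => q.1 == c')).map (fun q => (q.2, q.1))))
        = ks.flatMap (fun c' => (((pl.filter (fun q => !(q.1 == c))).filter (fun q => q.1 == c')).map (fun q => (q.2, q.1)))) := by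
      refine (List.flatMap_congr ?_).symm
      intro c' hc'
      rw [hagree c' hc']
    rw [hflat]
    refine List.Perm.trans (List.Perm.append_left _ hrec) ?_
    rw [← List.map_append]
    exact List.Perm.map _ (List.filter_append_perm _ pl)

-- the nested append loops of B are a flatMap over the sorted keys
theorem pv_out_eq_flatMap (state : List Int) (lex_ics : List (String × List Int)) :
    ((PySem.List.sorted (pvBuckets state lex_ics).keys (fun d => d)).foldl
      (fun acc d =>
        (PySem.List.sorted ((pvBuckets state lex_ics).getD d []) (fun w => w)).foldl
          (fun acc2 w => acc2 ++ [(w, d)]) acc) [])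
    = (PySem.List.sorted (pvBuckets state lex_ics).keys (fun d => d)).flatMap
        (fun d => (PySem.List.sorted ((pvBuckets state lex_ics).getD d []) (fun w => w)).map (fun w => (w, d))) := by
  have hstep : (fun (acc : List (String × Int)) d =>
      (PySem.List.sorted ((pvBuckets state lex_ics).getD d []) (fun w => w)).foldl
        (fun acc2 w => acc2 ++ [(w, d)]) acc)
      = (fun acc d => acc ++ (PySem.List.sorted ((pvBuckets state lex_ics).getD d []) (fun w => w)).map (fun w => (w, d))) := by
    funext acc d
    exact PySem.List.foldl_append_singleton_eq_map _ _ _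
  rw [hstep, PySem.List.foldl_append_eq_flatMap]
  simp

theorem pv_out_perm (state : List Int) (lex_ics : List (String × List Int)) :
    ((PySem.List.sorted (pvBuckets state lex_ics).keys (fun d => d)).flatMap
        (fun d => (PySem.List.sorted ((pvBuckets state lex_ics).getD d []) (fun w => w)).map (fun w => (w, d)))).Perm
      (lex_ics.map (fun p => (p.1, hamming_dist state p.2))) := by
  have hnd : (PySem.List.sorted (pvBuckets state lex_ics).keys (fun d => d)).Nodup :=
    (PySem.List.sorted_perm _ _ _).symm.nodup (pvBuckets_keys_nodup state lex_ics)
  have hmem : ∀ c, c ∈ PySem.List.sorted (pvBuckets state lex_ics).keys (fun d => d)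
      ↔ c ∈ (pvPairs state lex_ics).map (fun q => q.1) := by
    intro c
    rw [PySem.List.mem_sorted]
    exact pvBuckets_mem_keys state lex_ics c
  have hpart := pv_flat_partition _ (pvPairs state lex_ics) hnd hmem
  have h1 : ((PySem.List.sorted (pvBuckets state lex_ics).keys (fun d => d)).flatMap
        (fun d => (PySem.List.sorted ((pvBuckets state lex_ics).getD d []) (fun w => w)).map (fun w => (w, d)))).Perm
      ((PySem.List.sorted (pvBuckets state lex_ics).keys (fun d => d)).flatMap
        (fun c => (((pvPairs state lex_ics).filter (fun q => q.1 == c)).map (fun q => (q.2, q.1))))) := by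
    refine (List.Perm.refl _).flatMap ?_
    intro d _
    have e1 : ((pvBuckets state lex_ics).getD d []).map (fun w => (w, d))
        = ((pvPairs state lex_ics).filter (fun q => q.1 == d)).map (fun q => (q.2, q.1)) := by
      rw [pvBuckets_getD, List.map_map]
      apply List.map_congr_left
      intro q hq
      have hq1 : q.1 = d := by simpa using (List.mem_filter.mp hq).2
      simp [Function.comp, hq1]
    exact (List.Perm.map (fun w => (w, d)) (PySem.List.sorted_perm _ _ _)).trans (e1 ▸ List.Perm.refl _)
  have hfin : (pvPairs state lex_ics).map (fun q => (q.2, q.1))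
      = lex_ics.map (fun p => (p.1, hamming_dist state p.2)) := by
    unfold pvPairs
    rw [List.map_map]
    rfl
  rw [← hfin]
  exact h1.trans hpart

-- blocks with constant, strictly increasing distance, each internally sorted, concatenate to a pvKey-sorted list
theorem pv_pairwise_flatMap (ds : List Int) (F : Int → List (String × Int))
    (hds : ds.Pairwise (· < ·))
    (hsnd : ∀ d, ∀ x ∈ F d, x.2 = d)
    (hin : ∀ d, (F d).Pairwise (fun a b => pvKey a ≤ pvKey b)) :
    (ds.flatMap F).Pairwise (fun a b => pvKey a ≤ pvKey b) := by
  induction ds with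
  | nil => simp
  | cons d ds ih =>
    rw [List.flatMap_cons, List.pairwise_append]
    refine ⟨hin d, ih (List.pairwise_cons.mp hds).2, ?_⟩
    intro a ha b hb
    obtain ⟨d', hd', hb'⟩ := List.mem_flatMap.mp hb
    have hdd' : d < d' := (List.pairwise_cons.mp hds).1 d' hd'
    have ha2 : a.2 = d := hsnd d a ha
    have hb2 : b.2 = d' := hsnd d' b hb'
    simp only [pvKey]
    exact le_of_lt (Prod.Lex.toLex_lt_toLex.mpr (Or.inl (by rw [ha2, hb2]; exact hdd')))

theorem pv_out_pairwise (state : List Int) (lex_ics : List (String × List Int)) :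
    List.Pairwise (fun a b => pvKey a ≤ pvKey b)
      ((PySem.List.sorted (pvBuckets state lex_ics).keys (fun d => d)).flatMap
        (fun d => (PySem.List.sorted ((pvBuckets state lex_ics).getD d []) (fun w => w)).map (fun w => (w, d)))) := by
  have hnd : (PySem.List.sorted (pvBuckets state lex_ics).keys (fun d => d)).Nodup :=
    (PySem.List.sorted_perm _ _ _).symm.nodup (pvBuckets_keys_nodup state lex_ics)
  have hle := PySem.List.sorted_pairwise (pvBuckets state lex_ics).keys (fun d => d)
  have hlt : (PySem.List.sorted (pvBuckets state lex_ics).keys (fun d => d)).Pairwise (· < ·) :=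
    (hle.and hnd).imp (fun h => lt_of_le_of_ne h.1 h.2)
  refine pv_pairwise_flatMap _ _ hlt ?_ ?_
  · intro d x hx
    obtain ⟨w, _, rfl⟩ := List.mem_map.mp hx
    rfl
  · intro d
    rw [List.pairwise_map]
    refine (PySem.List.sorted_pairwise _ (fun w => w)).imp ?_
    intro a b h
    simp only [pvKey]
    rw [Prod.Lex.toLex_le_toLex]
    exact Or.inr ⟨rfl, h⟩

theorem pv_main (state : List Int) (lex_ics : List (String × List Int)) (top_n : Int) :
    nearest_in_lex state lex_ics top_n = nearest_in_lex_alt state lex_ics top_n := by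
  show PySem.List.slice
      (PySem.List.sorted2 (lex_ics.map (fun p => (p.1, hamming_dist state p.2))) (fun x => x.2) (fun x => x.1))
      none (some top_n)
    = PySem.List.slice
      ((PySem.List.sorted (pvBuckets state lex_ics).keys (fun d => d)).foldl
        (fun acc d =>
          (PySem.List.sorted ((pvBuckets state lex_ics).getD d []) (fun w => w)).foldl
            (fun acc2 w => acc2 ++ [(w, d)]) acc) [])
      none (some top_n)
  rw [pv_sorted2_eq_sorted, pv_out_eq_flatMap]
  refine congrArg (fun xs => PySem.List.slice xs none (some top_n)) ?_
  apply PySem.List.eq_of_perm_of_pairwise_le_of_injective pvKey pvKey_injective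
  · exact (PySem.List.sorted_perm _ _ _).trans (pv_out_perm state lex_ics).symm
  · exact PySem.List.sorted_pairwise _ _
  · exact pv_out_pairwise state lex_ics

-- ===== VERDICT (by name: the statement is the Claim_ definition above) =====
theorem nearest_in_lex_spec : Claim_equal_nearest_in_lex := by
  intro state lex_ics top_n _
  unfold Spec_nearest_in_lex
  exact pv_main state lex_ics top_n
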